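-- pv_equiv track=rewrite | github.com/stharrold/interview_prep | interview_prep/interview_cake/interview_cake.py | _get_next_path
-- ===== SOURCE A (Python) =====
-- import copy
--
-- def _get_next_path(current_path):
--     """Semi-private method to get next path in a breadth-first search of a binary tree.
--
--     Args:
--         current_path: list
--             Path to current node of within a binary tree.
--             Example: [1, 2, 2]; [2, 2, 2]
--
--     Returns:
--         next_path: list
--             Path of `next_node` of a full binary tree following breadth-first search.
--             Example from Args: current_path: [2, 1, 1]; [1, 1, 1, 1]
--
--     See Also:
--         is_valid_bin_search, _get_next_node_path
--
--     Notes: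
--         - Assumes that binary tree is full. Calling scope must check that path is valid.
--         - Complexity:
--             Time: O(len_path) ~ O(log2(num_nodes_of_bin_tree))
--             Space: O(len_path) ~ O(log2(num_nodes_of_bin_tree))
--
--     """
--     # Find a cousin node at the same depth otherwise descend to next depth of binary tree.
--     next_path = copy.copy(current_path)
--     found_cousin_node_at_same_depth = None
--     for rev_path_idx, bin_tree_idx in enumerate(reversed(current_path), start=1):
--         if bin_tree_idx == 2:
--             next_path[-rev_path_idx] = 1
--         else:
--             next_path[-rev_path_idx] = 2
--             found_cousin_node_at_same_depth = True
--             break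
--     if not found_cousin_node_at_same_depth:
--         next_path.append(1)
--     return next_path
-- ===== SOURCE B (Python) =====
-- def _get_next_path(current_path):
--     """Divide-and-conquer increment: a segment increments by incrementing its
--     right half; only if the right half overflows (was all 2s, becoming all 1s)
--     does the carry move into the left half. Recursion depth is O(log n)."""
--     def _inc(seg):
--         n = len(seg)
--         if n == 0:
--             return [], True
--         if n == 1:
--             return ([1], True) if seg[0] == 2 else ([2], False)
--         left, right = seg[:n // 2], seg[n // 2:]
--         r, carry = _inc(right)
--         if not carry:
--             return left + r, False
--         l, carry = _inc(left)
--         return l + r, carry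
--     res, carry = _inc(current_path)
--     return [1] + res if carry else res
-- ===== Notes on version B (the rewrite author's own statement) =====
-- stated objective: alternative
-- what changed: Replaces A's right-to-left scan that mutates a copied list with a divide-and-conquer increment: a segment is incremented by incrementing its right half, and only if that half overflows (was all 2s) does the carry recurse into the left half; the input is never mutated.
import Mathlib
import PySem

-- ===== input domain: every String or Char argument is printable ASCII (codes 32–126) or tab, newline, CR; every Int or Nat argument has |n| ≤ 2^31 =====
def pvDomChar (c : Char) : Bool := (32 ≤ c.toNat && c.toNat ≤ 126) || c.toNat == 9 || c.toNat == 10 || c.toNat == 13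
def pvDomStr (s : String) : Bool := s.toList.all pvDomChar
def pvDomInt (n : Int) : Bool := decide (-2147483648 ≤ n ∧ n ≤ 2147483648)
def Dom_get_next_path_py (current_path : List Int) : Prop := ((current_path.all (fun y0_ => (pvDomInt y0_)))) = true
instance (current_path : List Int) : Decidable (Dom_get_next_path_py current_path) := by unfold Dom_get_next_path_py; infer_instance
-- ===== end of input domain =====

-- B replaces A's right-to-left mutating scan by a divide-and-conquer carry increment
-- (alternative decomposition; not faster); B does not mutate its argument.

-- ===== PORT A =====
-- A's for-loop over `enumerate(reversed(current_path), start=1)` with a break: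
-- state is (next_path, remaining reversed elements, rev_path_idx); the Bool is
-- `found_cousin_node_at_same_depth`. `next_path[-idx] = v` is `set (length - idx) v`.
def loopA_get_next_path : List Int → List Int → Nat → List Int × Bool
  | np, [], _ => (np, false)
  | np, x :: xs, idx =>
    if x = 2 then loopA_get_next_path (np.set (np.length - idx) 1) xs (idx + 1)
    else (np.set (np.length - idx) 2, true)

def get_next_path_py (current_path : List Int) : List Int :=
  let r := loopA_get_next_path current_path current_path.reverse 1
  if r.2 then r.1 else r.1 ++ [1]  -- `next_path.append(1)` when no cousin found

-- ===== PORT B =====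
-- Source B's `_inc`: increment a segment; the Bool is `carry` (segment was all 2s).
def incB : List Int → List Int × Bool
  | [] => ([], true)
  | [d] => if d = 2 then ([1], true) else ([2], false)
  | x :: y :: rest =>
    let seg := x :: y :: rest
    let left := seg.take (seg.length / 2)
    let right := seg.drop (seg.length / 2)
    let rc := incB right
    if !rc.2 then (left ++ rc.1, false)
    else
      let lc := incB left
      (lc.1 ++ rc.1, lc.2)
termination_by seg => seg.length
decreasing_by
  · simp only [List.length_drop]; simp only [List.length_cons]; omega
  · simp only [List.length_take]; simp only [List.length_cons]; omega

def get_next_path_py_alt (current_path : List Int) : List Int :=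
  let rc := incB current_path
  if rc.2 then 1 :: rc.1 else rc.1

-- ===== PRECONDITION & SPEC =====
def Spec_get_next_path_py (current_path : List Int) (out : List Int) : Prop := out = get_next_path_py_alt current_path
instance (current_path : List Int) (out : List Int) : Decidable (Spec_get_next_path_py current_path out) := by unfold Spec_get_next_path_py; infer_instance

-- ===== CLAIM (what is proved, stated in full; the proofs are below) =====
def Claim_equal_get_next_path_py : Prop := ∀ (current_path : List Int), Dom_get_next_path_py current_path → Spec_get_next_path_py current_path (get_next_path_py current_path)

-- ===== LEMMAS AND PROOFS =====

-- Common reference function on the REVERSED path: turn leading 2s into 1s until the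
-- first non-2 (which becomes 2); if all are 2, the result is all 1s one longer.
def hrev : List Int → List Int
  | [] => [1]
  | x :: xs => if x = 2 then 1 :: hrev xs else 2 :: xs

theorem loopA_spec (rev : List Int) : ∀ (k : Nat) (np : List Int),
    np = rev.reverse ++ List.replicate k 1 →
    (let r := loopA_get_next_path np rev (k + 1);
     (if r.2 then r.1 else r.1 ++ [1]) = (hrev rev).reverse ++ List.replicate k 1) := by
  induction rev with
  | nil =>
    intro k np h
    simp only [loopA_get_next_path, h, hrev]
    simp [← List.replicate_succ', List.replicate_succ]
  | cons x xs ih =>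
    intro k np h
    have hnp : np = xs.reverse ++ x :: List.replicate k 1 := by
      simp [h, List.reverse_cons, List.append_assoc]
    have hlen : np.length = xs.length + (k + 1) := by
      simp [hnp]
    have hidx : np.length - (k + 1) = xs.length := by omega
    have hset : ∀ v : Int, np.set (np.length - (k + 1)) v
        = xs.reverse ++ v :: List.replicate k 1 := by
      intro v
      rw [hidx, hnp, List.set_append_right _ _ (by simp)]
      simp
    by_cases hx : x = 2
    · have h1 : np.set (np.length - (k + 1)) 1 = xs.reverse ++ List.replicate (k + 1) 1 := by
        rw [hset]; simp [List.replicate_succ]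
      have := ih (k + 1) _ h1
      simpa [loopA_get_next_path, hx, hrev, List.replicate_succ] using this
    · simp only [loopA_get_next_path, if_neg hx, hrev]
      rw [hset]
      simp [List.reverse_cons, List.append_assoc]

theorem get_next_path_py_eq_hrev (l : List Int) :
    get_next_path_py l = (hrev l.reverse).reverse := by
  have := loopA_spec l.reverse 0 l (by simp)
  simpa [get_next_path_py] using this

-- hrev on an all-2 list gives all 1s, one longer.
theorem hrev_all_two (l : List Int) (h : ∀ a ∈ l, a = 2) :
    hrev l = List.replicate (l.length + 1) 1 := by
  induction l with
  | nil => simp [hrev]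
  | cons x xs ih =>
    have hx : x = 2 := h x (by simp)
    simp only [hrev, if_pos hx, ih (fun a ha => h a (by simp [ha]))]
    simp [List.replicate_succ]

-- hrev consumes only an all-2 prefix: an all-2 front peels off as 1s.
theorem hrev_twos_append (t m : List Int) (h : ∀ a ∈ t, a = 2) :
    hrev (t ++ m) = List.replicate t.length 1 ++ hrev m := by
  induction t with
  | nil => simp
  | cons x xs ih =>
    have hx : x = 2 := h x (by simp)
    simp only [List.cons_append, hrev, if_pos hx, ih (fun a ha => h a (by simp [ha]))]
    simp [List.replicate_succ]

-- If the front contains a non-2, hrev never reaches the appended tail.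
theorem hrev_append_of_non_two (t m : List Int) (h : ∃ a ∈ t, a ≠ 2) :
    hrev (t ++ m) = hrev t ++ m := by
  induction t with
  | nil => simp at h
  | cons x xs ih =>
    by_cases hx : x = 2
    · have hxs : ∃ a ∈ xs, a ≠ 2 := by
        obtain ⟨a, ha, hne⟩ := h
        rcases List.mem_cons.mp ha with rfl | ha'
        · exact absurd hx hne
        · exact ⟨a, ha', hne⟩
      simp [hrev, hx, List.cons_append, ih hxs]
    · simp [hrev, hx, List.cons_append]

-- Characterisation of incB: the carry flag is "all elements are 2", and the list
-- is the incremented segment ((hrev ·.reverse).reverse without the overflow digit).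
theorem incB_eq_cons (x y : Int) (rest : List Int) :
    incB (x :: y :: rest) =
      (let seg := x :: y :: rest
       let left := seg.take (seg.length / 2)
       let right := seg.drop (seg.length / 2)
       let rc := incB right
       if !rc.2 then (left ++ rc.1, false)
       else
         let lc := incB left
         (lc.1 ++ rc.1, lc.2)) := by
  rw [incB]

theorem incB_spec_aux : ∀ (n : Nat) (l : List Int), l.length ≤ n →
    incB l = (if ∀ a ∈ l, a = 2 then List.replicate l.length 1
              else (hrev l.reverse).reverse,
              decide (∀ a ∈ l, a = 2)) := by
  intro n
  induction n with
  | zero =>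
    intro l hl
    have : l = [] := List.eq_nil_of_length_eq_zero (Nat.le_zero.mp hl)
    subst this
    simp [incB]
  | succ n ih =>
    intro l hl
    match l with
    | [] => simp [incB]
    | [d] =>
      by_cases hd : d = 2
      · simp [incB, hd, hrev]
      · simp [incB, hd, hrev]
    | x :: y :: rest =>
      set seg := x :: y :: rest with hseg
      set left := seg.take (seg.length / 2) with hleft
      set right := seg.drop (seg.length / 2) with hright
      have hsplit : left ++ right = seg := List.take_append_drop _ _
      have hlen : seg.length = rest.length + 2 := by simp [hseg]
      have hlenl : left.length = seg.length / 2 := by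
        rw [hleft, List.length_take]; omega
      have hlenr : right.length = seg.length - seg.length / 2 := by
        rw [hright, List.length_drop]
      have ihl := ih left (by omega)
      have ihr := ih right (by omega)
      rw [incB_eq_cons]
      simp only [← hseg, ← hleft, ← hright]
      by_cases hcr : ∀ a ∈ right, a = 2
      · -- carry from the right half: recurse into the left half too
        rw [ihr, ihl]
        simp only [if_pos hcr, hcr, decide_true, Bool.not_true, Bool.false_eq_true,
          if_false]
        by_cases hlall : ∀ a ∈ left, a = 2
        · have hall : ∀ a ∈ seg, a = 2 := by
            intro a ha
            rw [← hsplit] at ha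
            rcases List.mem_append.mp ha with h' | h'
            · exact hlall a h'
            · exact hcr a h'
          simp only [if_pos hlall, if_pos hall]
          rw [← List.replicate_add]
          have hsum : left.length + right.length = seg.length := by
            rw [← List.length_append, hsplit]
          rw [hsum]
          rw [decide_eq_true hcr]
          simp only [Bool.not_true, Bool.false_eq_true, if_false, Prod.mk.injEq,
            decide_eq_decide, true_and]
          exact ⟨fun _ => hall, fun _ => hlall⟩
        · have hnotl : ¬ ∀ a ∈ seg, a = 2 := by
            intro hall
            exact hlall fun a ha => hall a (by rw [← hsplit]; exact List.mem_append_left _ ha)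
          have hallrr : ∀ a ∈ right.reverse, a = 2 := by simpa using hcr
          have hrevsplit : seg.reverse = right.reverse ++ left.reverse := by
            rw [← hsplit, List.reverse_append]
          simp only [if_neg hlall, if_neg hnotl]
          rw [hrevsplit, hrev_twos_append _ _ hallrr]
          rw [decide_eq_true hcr]
          simp [hlall, hnotl]
      · -- no carry: the left half is copied unchanged
        obtain ⟨a, ha, hane⟩ := not_forall₂.mp hcr
        have hnotl : ¬ ∀ b ∈ seg, b = 2 := by
          intro hall
          exact hane (hall a (by rw [← hsplit]; exact List.mem_append_right _ ha))
        rw [ihr]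
        simp only [if_neg hcr, hcr, decide_false, Bool.not_false, if_true]
        have hex : ∃ b ∈ right.reverse, b ≠ 2 := ⟨a, by simpa using ha, hane⟩
        have hrevsplit : seg.reverse = right.reverse ++ left.reverse := by
          rw [← hsplit, List.reverse_append]
        rw [if_neg hnotl, hrevsplit, hrev_append_of_non_two _ _ hex]
        simp [hnotl]

theorem incB_spec (l : List Int) :
    incB l = (if ∀ a ∈ l, a = 2 then List.replicate l.length 1
              else (hrev l.reverse).reverse,
              decide (∀ a ∈ l, a = 2)) :=
  incB_spec_aux l.length l le_rfl

theorem get_next_path_py_alt_eq_hrev (l : List Int) :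
    get_next_path_py_alt l = (hrev l.reverse).reverse := by
  unfold get_next_path_py_alt
  rw [incB_spec]
  by_cases h : ∀ a ∈ l, a = 2
  · have hrevall : ∀ a ∈ l.reverse, a = 2 := by simpa using h
    simp only [hrev_all_two _ hrevall, List.length_reverse, List.reverse_replicate]
    rw [decide_eq_true h, if_pos rfl]
    simp [List.replicate_succ]
    exact h
  · simp [h]

-- ===== VERDICT (by name: the statement is the Claim_ definition above) =====
theorem get_next_path_py_spec : Claim_equal_get_next_path_py := by
  intro l _
  unfold Spec_get_next_path_py
  rw [get_next_path_py_eq_hrev, get_next_path_py_alt_eq_hrev]
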